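-- pv_equiv track=rewrite | github.com/Prajjwal98Dubey/DSA-Algorithms | cses/searching and sorting/concerttickets.py | solve
-- ===== SOURCE A (Python) =====
-- def solve(tickets,nums):
--     tickets.sort()
--     #[5,5,7,8]  target => 8
--     def bs(target,arr):
--         l,r = 0,len(arr)-1
--         while l<=r:
--             mid = (l+r)//2
--             if arr[mid] < target:
--                 l = mid+1
--             elif arr[mid] > target:
--                 r = mid-1
--             else:
--                 return mid
--         return r if 0 <= r < len(arr) and arr[r] <= target else -1
--     ans = []
--     for n in nums:
--         index = bs(n,tickets)
--         if index !=-1: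
--             ans.append(tickets[index])
--             tickets = tickets[:index] + tickets[index+1:]
--         else:
--             ans.append(-1)
--     return ans
-- ===== SOURCE B (Python) =====
-- # B: alternative strategy — keep the still-available tickets sorted in DESCENDING order
-- # and take the first one that fits each budget by a single linear scan (no binary search,
-- # no slice rebuilding).  Return value only: unlike A, B does not sort the caller's
-- # `tickets` list in place.
-- def solve(tickets, nums):
--     avail = sorted(tickets, reverse=True)
--     ans = []
--     for n in nums:
--         for i, t in enumerate(avail):
--             if t <= n:
--                 ans.append(t)
--                 del avail[i]
--                 break
--         else:
--             ans.append(-1)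
--     return ans
-- ===== Notes on version B (the rewrite author's own statement) =====
-- stated objective: alternative
-- what changed: B keeps the remaining tickets sorted descending and takes the first ticket that fits each budget by a linear scan with an in-place delete, instead of A's hand-rolled binary search plus slice-concatenation rebuild of the list; B also leaves the caller's tickets list unmutated (A sorts it in place).
import Mathlib
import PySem

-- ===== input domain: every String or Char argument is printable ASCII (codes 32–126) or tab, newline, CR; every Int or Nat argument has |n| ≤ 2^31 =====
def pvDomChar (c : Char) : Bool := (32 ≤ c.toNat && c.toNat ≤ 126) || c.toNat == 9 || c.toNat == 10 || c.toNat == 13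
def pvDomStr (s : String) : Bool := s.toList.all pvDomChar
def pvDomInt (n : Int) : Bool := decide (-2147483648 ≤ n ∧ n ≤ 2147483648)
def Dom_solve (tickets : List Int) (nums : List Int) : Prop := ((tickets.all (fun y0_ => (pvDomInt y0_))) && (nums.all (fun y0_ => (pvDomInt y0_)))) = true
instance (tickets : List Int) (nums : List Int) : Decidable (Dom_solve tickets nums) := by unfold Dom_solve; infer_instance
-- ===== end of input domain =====

-- B assigns each budget the largest remaining ticket by a descending linear scan instead of
-- A's binary search + slice rebuild; equivalence is about the RETURN value only (A sorts the
-- caller's `tickets` in place, B does not mutate it).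

-- ===== PORT A =====
-- the `while l <= r` binary-search loop of A's inner helper `bs`; the Nat fuel only
-- makes the recursion structural (it shrinks by ≥ 1 per iteration, so `arr.length + 1`
-- is never exhausted — proved in bsLoop_post below)
def bsLoop (arr : List Int) (target : Int) : Nat → Int → Int → Int
  | 0, _, _ => -1
  | fuel + 1, l, r =>
    if l ≤ r then
      let mid := PySem.Int.floordiv (l + r) 2
      if PySem.List.pyGetD arr mid 0 < target then
        bsLoop arr target fuel (mid + 1) r
      else if target < PySem.List.pyGetD arr mid 0 then
        bsLoop arr target fuel l (mid - 1)
      else mid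
    else
      if 0 ≤ r ∧ r < (arr.length : Int) ∧ PySem.List.pyGetD arr r 0 ≤ target then r else -1

def bs (target : Int) (arr : List Int) : Int :=
  bsLoop arr target (arr.length + 1) 0 ((arr.length : Int) - 1)

def solve (tickets : List Int) (nums : List Int) : List Int :=
  let ts := PySem.List.sorted tickets (fun x => x) false
  (nums.foldl (fun st n =>
      let index := bs n st.1
      if index ≠ -1 then
        (PySem.List.slice st.1 none (some index) ++ PySem.List.slice st.1 (some (index + 1)) none,
         st.2 ++ [PySem.List.pyGetD st.1 index 0])
      else (st.1, st.2 ++ [-1]))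
    (ts, ([] : List Int))).2

-- ===== PORT B =====
-- `for i, t in enumerate(avail): if t <= n: del avail[i]; break` — first fitting ticket and the rest
def scanTake (avail : List Int) (n : Int) : Option (Int × List Int) :=
  match avail with
  | [] => none
  | t :: rest =>
      if t ≤ n then some (t, rest)
      else (scanTake rest n).map (fun p => (p.1, t :: p.2))

def solve_alt (tickets : List Int) (nums : List Int) : List Int :=
  (nums.foldl (fun st n =>
      match scanTake st.1 n with
      | some (t, rest) => (rest, st.2 ++ [t])
      | none => (st.1, st.2 ++ [-1]))
    (PySem.List.sorted tickets (fun x => x) true, ([] : List Int))).2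

-- ===== PRECONDITION & SPEC =====
def Spec_solve (tickets : List Int) (nums : List Int) (out : List Int) : Prop := out = solve_alt tickets nums
instance (tickets : List Int) (nums : List Int) (out : List Int) : Decidable (Spec_solve tickets nums out) := by unfold Spec_solve; infer_instance

-- ===== CLAIM (what is proved, stated in full; the proofs are below) =====
def Claim_equal_solve : Prop := ∀ (tickets : List Int) (nums : List Int), Dom_solve tickets nums → Spec_solve tickets nums (solve tickets nums)

-- ===== LEMMAS AND PROOFS =====

-- P and Q below abbreviate xs.takeWhile (· ≤ n) and xs.dropWhile (· ≤ n) for the budget n.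

-- every element the dropWhile leaves is strictly above the budget (needs sortedness)
lemma mem_dropWhile_gt (n : Int) (xs : List Int) (hs : xs.Pairwise (· ≤ ·)) :
    ∀ t ∈ xs.dropWhile (fun x => decide (x ≤ n)), n < t := by
  induction xs with
  | nil => simp
  | cons x rest ih =>
    intro t ht
    rw [List.dropWhile_cons] at ht
    by_cases hx : x ≤ n
    · simp only [hx, decide_true] at ht
      exact ih hs.tail t ht
    · simp only [hx, decide_false] at ht
      rcases List.mem_cons.mp ht with rfl | ht
      · omega
      · have := (List.pairwise_cons.mp hs).1 t ht
        omega

lemma scanTake_append_skip (pre rest : List Int) (n : Int) (h : ∀ t ∈ pre, n < t) :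
    scanTake (pre ++ rest) n = (scanTake rest n).map (fun q => (q.1, pre ++ q.2)) := by
  induction pre with
  | nil => cases hq : scanTake rest n <;> simp_all
  | cons x pre ih =>
    have hx : ¬ x ≤ n := by have := h x (by simp); omega
    rw [List.cons_append]
    simp only [scanTake, hx, if_false]
    rw [ih (fun t ht => h t (by simp [ht]))]
    cases scanTake rest n <;> simp

-- B's scan on the reversed (descending) list, characterised by takeWhile/dropWhile of the ascending list
lemma stepB (n : Int) (xs : List Int) (hs : xs.Pairwise (· ≤ ·)) :
    scanTake xs.reverse n =
      if hP : xs.takeWhile (fun x => decide (x ≤ n)) = [] then none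
      else some ((xs.takeWhile (fun x => decide (x ≤ n))).getLast hP,
        ((xs.takeWhile (fun x => decide (x ≤ n))).dropLast ++ xs.dropWhile (fun x => decide (x ≤ n))).reverse) := by
  have h1 : xs.reverse
      = (xs.dropWhile (fun x => decide (x ≤ n))).reverse ++ (xs.takeWhile (fun x => decide (x ≤ n))).reverse := by
    rw [← List.reverse_append, List.takeWhile_append_dropWhile]
  rw [h1, scanTake_append_skip _ _ _ (fun t ht => mem_dropWhile_gt n xs hs t (List.mem_reverse.mp ht))]
  by_cases hP : xs.takeWhile (fun x => decide (x ≤ n)) = []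
  · simp [hP, scanTake]
  · have h2 : (xs.takeWhile (fun x => decide (x ≤ n))).reverse
        = (xs.takeWhile (fun x => decide (x ≤ n))).getLast hP
          :: (xs.takeWhile (fun x => decide (x ≤ n))).dropLast.reverse := by
      conv_lhs => rw [← List.dropLast_append_getLast hP]
      rw [List.reverse_append]
      simp
    have hle : (xs.takeWhile (fun x => decide (x ≤ n))).getLast hP ≤ n := by
      have := List.mem_takeWhile_imp (List.getLast_mem hP)
      simpa using this
    rw [h2]
    simp only [scanTake, hle, hP, dite_false]
    simp [List.reverse_append]

-- a sorted list where the k-th element equals a lower bound x starts with x after that erase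
lemma cons_eraseIdx_sorted (x : Int) (ys : List Int) (k : Nat) (hk : k < ys.length)
    (hall : ∀ y ∈ ys, x ≤ y) (hs : ys.Pairwise (· ≤ ·)) (hv : ys[k] = x) :
    ys = x :: ys.eraseIdx k := by
  induction ys generalizing k with
  | nil => simp at hk
  | cons y ys ih =>
    cases k with
    | zero =>
      simp only [List.getElem_cons_zero] at hv
      simp [List.eraseIdx, hv]
    | succ k =>
      have hk' : k < ys.length := by simpa using hk
      have hv' : ys[k] = x := by simpa using hv
      have hy : y = x := by
        have h1 : x ≤ y := hall y List.mem_cons_self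
        have h2 : y ≤ ys[k] := (List.pairwise_cons.mp hs).1 _ (List.getElem_mem hk')
        omega
      have hrec := ih k hk' (fun y' hy' => hall y' (List.mem_cons_of_mem _ hy')) hs.tail hv'
      calc y :: ys = y :: x :: ys.eraseIdx k := by rw [← hrec]
        _ = x :: (y :: ys).eraseIdx (k + 1) := by rw [hy, List.eraseIdx_cons_succ]

-- erasing any of two equal positions of a sorted list gives the same list
lemma eraseIdx_between (xs : List Int) (hs : xs.Pairwise (· ≤ ·)) (i j : Nat) (hij : i ≤ j)
    (hj : j < xs.length) (hv : xs[i]'(by omega) = xs[j]) : xs.eraseIdx i = xs.eraseIdx j := by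
  induction xs generalizing i j with
  | nil => simp at hj
  | cons x rest ih =>
    cases i with
    | zero =>
      cases j with
      | zero => rfl
      | succ k =>
        have hk : k < rest.length := by simpa using hj
        have hv' : rest[k] = x := by
          have : x = rest[k] := by simpa using hv
          omega
        simp only [List.eraseIdx_cons_zero, List.eraseIdx_cons_succ]
        exact cons_eraseIdx_sorted x rest k hk (List.pairwise_cons.mp hs).1 hs.tail hv'
    | succ m =>
      cases j with
      | zero => omega
      | succ k =>
        simp only [List.eraseIdx_cons_succ, List.cons.injEq, true_and]
        exact ih hs.tail m k (by omega) (by simpa using hj) (by simpa using hv)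

lemma sorted_getElem_le (xs : List Int) (hs : xs.Pairwise (· ≤ ·)) (i j : Nat) (hij : i ≤ j)
    (hj : j < xs.length) : xs[i]'(by omega) ≤ xs[j] := by
  rcases Nat.eq_or_lt_of_le hij with rfl | h
  · exact le_refl _
  · exact List.pairwise_iff_getElem.mp hs i j (by omega) hj h

-- postcondition of A's binary-search loop on a sorted array
lemma bsLoop_post (arr : List Int) (t : Int) (fuel : Nat) (l r : Int)
    (hs : arr.Pairwise (· ≤ ·)) (hfuel : (r + 1 - l).toNat < fuel)
    (hl : 0 ≤ l) (hr : r < (arr.length : Int))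
    (hL : ∀ (j : Nat) (hj : j < arr.length), (j : Int) < l → arr[j] < t)
    (hR : ∀ (j : Nat) (hj : j < arr.length), r < (j : Int) → t < arr[j]) :
    (bsLoop arr t fuel l r = -1 ∧ ∀ (j : Nat) (hj : j < arr.length), t < arr[j])
    ∨ (∃ i : Nat, bsLoop arr t fuel l r = (i : Int) ∧ ∃ hi : i < arr.length, arr[i] ≤ t ∧
        (arr[i] = t ∨ ∀ (j : Nat) (hj : j < arr.length), (i : Int) < (j : Int) → t < arr[j])) := by
  induction fuel generalizing l r with
  | zero => omega
  | succ fuel ih =>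
    by_cases h : l ≤ r
    · obtain ⟨hb1, hb2⟩ := PySem.Int.floordiv_two_mid_bounds h
      have hmlen : (PySem.Int.floordiv (l + r) 2).toNat < arr.length := by omega
      have hmid : PySem.List.pyGetD arr (PySem.Int.floordiv (l + r) 2) 0
          = arr[(PySem.Int.floordiv (l + r) 2).toNat] :=
        PySem.List.pyGetD_eq_getElem arr 0 (by omega) (by omega)
      by_cases hlt : PySem.List.pyGetD arr (PySem.Int.floordiv (l + r) 2) 0 < t
      · rw [show bsLoop arr t (fuel + 1) l r
            = bsLoop arr t fuel (PySem.Int.floordiv (l + r) 2 + 1) r by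
          simp only [bsLoop, if_pos h, if_pos hlt]]
        refine ih (PySem.Int.floordiv (l + r) 2 + 1) r (by omega) (by omega) hr ?_ hR
        intro j hj hjl
        by_cases hjl2 : (j : Int) < l
        · exact hL j hj hjl2
        · have hjm : j ≤ (PySem.Int.floordiv (l + r) 2).toNat := by omega
          have := sorted_getElem_le arr hs j (PySem.Int.floordiv (l + r) 2).toNat hjm hmlen
          rw [hmid] at hlt
          omega
      · by_cases hgt : t < PySem.List.pyGetD arr (PySem.Int.floordiv (l + r) 2) 0
        · rw [show bsLoop arr t (fuel + 1) l r
              = bsLoop arr t fuel l (PySem.Int.floordiv (l + r) 2 - 1) by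
            simp only [bsLoop, if_pos h, if_neg hlt, if_pos hgt]]
          refine ih l (PySem.Int.floordiv (l + r) 2 - 1) (by omega) hl (by omega) hL ?_
          intro j hj hjr
          by_cases hjr2 : r < (j : Int)
          · exact hR j hj hjr2
          · have hjm : (PySem.Int.floordiv (l + r) 2).toNat ≤ j := by omega
            have := sorted_getElem_le arr hs (PySem.Int.floordiv (l + r) 2).toNat j hjm hj
            rw [hmid] at hgt
            omega
        · rw [show bsLoop arr t (fuel + 1) l r = PySem.Int.floordiv (l + r) 2 by
            simp only [bsLoop, if_pos h, if_neg hlt, if_neg hgt]]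
          right
          refine ⟨(PySem.Int.floordiv (l + r) 2).toNat, by omega, hmlen, ?_, Or.inl ?_⟩
          · rw [hmid] at hgt; omega
          · rw [hmid] at hgt hlt; omega
    · by_cases hc : 0 ≤ r ∧ r < (arr.length : Int) ∧ PySem.List.pyGetD arr r 0 ≤ t
      · obtain ⟨hc1, hc2, hc3⟩ := hc
        have hrv : PySem.List.pyGetD arr r 0 = arr[r.toNat]'(by omega) :=
          PySem.List.pyGetD_eq_getElem arr 0 hc1 hc2
        rw [show bsLoop arr t (fuel + 1) l r = r by
          simp only [bsLoop, if_neg h, if_pos (⟨hc1, hc2, hc3⟩ : 0 ≤ r ∧ r < (arr.length : Int) ∧ PySem.List.pyGetD arr r 0 ≤ t)]]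
        right
        refine ⟨r.toNat, by omega, by omega, by rw [hrv] at hc3; omega, Or.inr ?_⟩
        intro j hj hjr
        exact hR j hj (by omega)
      · rw [show bsLoop arr t (fuel + 1) l r = -1 by
          simp only [bsLoop, if_neg h, if_neg hc]]
        left
        refine ⟨rfl, ?_⟩
        intro j hj
        by_cases hr0 : 0 ≤ r
        · exfalso
          have := hL r.toNat (by omega) (by omega)
          refine hc ⟨hr0, by omega, ?_⟩
          rw [PySem.List.pyGetD_eq_getElem arr 0 hr0 (by omega)]
          omega
        · exact hR j hj (by omega)

-- A's whole loop body (found index, value taken, list rebuilt by slices) in takeWhile/dropWhile form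
lemma stepA (n : Int) (xs ans : List Int) (hs : xs.Pairwise (· ≤ ·)) :
    (if bs n xs = -1 then (xs, ans ++ [(-1 : Int)])
     else (PySem.List.slice xs none (some (bs n xs)) ++ PySem.List.slice xs (some (bs n xs + 1)) none,
           ans ++ [PySem.List.pyGetD xs (bs n xs) 0]))
    = if hP : xs.takeWhile (fun x => decide (x ≤ n)) = [] then (xs, ans ++ [(-1 : Int)])
      else ((xs.takeWhile (fun x => decide (x ≤ n))).dropLast ++ xs.dropWhile (fun x => decide (x ≤ n)),
            ans ++ [(xs.takeWhile (fun x => decide (x ≤ n))).getLast hP]) := by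
  set P := xs.takeWhile (fun x => decide (x ≤ n)) with hPdef
  set Q := xs.dropWhile (fun x => decide (x ≤ n)) with hQdef
  have hx : xs = P ++ Q := (List.takeWhile_append_dropWhile).symm
  have hQ := mem_dropWhile_gt n xs hs
  have hPle : ∀ y ∈ P, y ≤ n := by
    intro y hy
    simpa using List.mem_takeWhile_imp hy
  have hplen : P.length ≤ xs.length := by
    rw [hPdef]; exact (List.takeWhile_sublist _).length_le
  have hpost := bsLoop_post xs n (xs.length + 1) 0 ((xs.length : Int) - 1) hs (by omega)
    (le_refl 0) (by omega)
    (fun j hj hj0 => absurd hj0 (by omega)) (fun j hj hjr => absurd hjr (by omega))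
  rcases hpost with ⟨hbs, hall⟩ | ⟨i, hbs, hi, hile, hdisj⟩
  · have hP : P = [] := by
      cases hp : P with
      | nil => rfl
      | cons a as =>
        exfalso
        have ha : a ≤ n := hPle a (by rw [hp]; exact List.mem_cons_self)
        have hamem : a ∈ xs := (List.takeWhile_sublist (fun x => decide (x ≤ n))).mem
          (by rw [← hPdef, hp]; exact List.mem_cons_self)
        obtain ⟨j, hj, rfl⟩ := List.mem_iff_getElem.mp hamem
        have := hall j hj
        omega
    rw [show bs n xs = -1 from hbs, if_pos rfl, dif_pos hP]
  · have hgtQ : ∀ (j : Nat) (hj : j < xs.length),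
        P.length ≤ j → n < xs[j] := by
      intro j hj hpj
      have hj' : j < (P ++ Q).length := by
        rw [← hx]; exact hj
      have h1 : xs[j] = Q[j - P.length]'(by
          simp only [List.length_append] at hj'; omega) := by
        rw [List.getElem_of_eq hx hj, List.getElem_append_right hpj]
      rw [h1]
      exact hQ _ (List.getElem_mem _)
    have hiP : i < P.length := by
      by_contra h'
      have := hgtQ i hi (by omega)
      omega
    have hP : P ≠ [] := by
      intro h0
      rw [h0] at hiP
      simp at hiP
    have hplpos : 0 < P.length := List.length_pos_iff.mpr hP
    have hpl1 : P.length - 1 < xs.length := by omega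
    have hlast : xs[P.length - 1]'hpl1
        = P.getLast hP := by
      rw [List.getElem_of_eq hx hpl1, List.getElem_append_left (by omega), List.getLast_eq_getElem hP]
    have hlastle : P.getLast hP ≤ n :=
      hPle _ (List.getLast_mem hP)
    have heq : xs[i] = xs[P.length - 1]'hpl1 := by
      rcases hdisj with hieq | hgt2
      · have h1 := sorted_getElem_le xs hs i (P.length - 1) (by omega) hpl1
        rw [hlast] at *
        omega
      · have hieq : i = P.length - 1 := by
          by_contra h'
          have h2 := hgt2 (P.length - 1) hpl1 (by omega)
          rw [hlast] at h2
          omega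
        subst hieq
        rfl
    have herase : xs.eraseIdx i = P.dropLast ++ Q := by
      rw [eraseIdx_between xs hs i (P.length - 1) (by omega) hpl1 heq]
      conv_lhs => rw [hx]
      rw [List.eraseIdx_append_of_lt_length (by omega), List.eraseIdx_length_sub_one]
    rw [show bs n xs = (i : Int) from hbs, dif_neg hP]
    rw [if_neg (by omega : ¬ (i : Int) = -1)]
    rw [PySem.List.slice_to xs (by omega), PySem.List.slice_from xs (by omega)]
    rw [show ((i : Int)).toNat = i by omega, show ((i : Int) + 1).toNat = i + 1 by omega]
    rw [← List.eraseIdx_eq_take_drop_succ, herase]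
    rw [PySem.List.pyGetD_eq_getElem xs 0 (by omega) (by omega)]
    simp only [Int.toNat_natCast]
    rw [heq, hlast]

lemma sorted_step (n : Int) (xs : List Int) (hs : xs.Pairwise (· ≤ ·)) :
    ((xs.takeWhile (fun x => decide (x ≤ n))).dropLast ++ xs.dropWhile (fun x => decide (x ≤ n))).Pairwise (· ≤ ·) := by
  have hsub : ((xs.takeWhile (fun x => decide (x ≤ n))).dropLast ++ xs.dropWhile (fun x => decide (x ≤ n))).Sublist xs := by
    conv_rhs => rw [← List.takeWhile_append_dropWhile (p := fun x => decide (x ≤ n)) (l := xs)]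
    exact List.Sublist.append (List.dropLast_sublist _) (List.Sublist.refl _)
  exact hs.sublist hsub

-- the two loop bodies walked in lock-step: B's list is the reverse of A's
lemma fold_eq (nums : List Int) : ∀ (xs ans : List Int), xs.Pairwise (· ≤ ·) →
    (nums.foldl (fun st n =>
        let index := bs n st.1
        if index ≠ -1 then
          (PySem.List.slice st.1 none (some index) ++ PySem.List.slice st.1 (some (index + 1)) none,
           st.2 ++ [PySem.List.pyGetD st.1 index 0])
        else (st.1, st.2 ++ [-1])) (xs, ans)).2
    = (nums.foldl (fun st n =>
        match scanTake st.1 n with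
        | some (t, rest) => (rest, st.2 ++ [t])
        | none => (st.1, st.2 ++ [-1])) (xs.reverse, ans)).2 := by
  induction nums with
  | nil => intro xs ans hs; rfl
  | cons n rest ih =>
    intro xs ans hs
    have hA := stepA n xs ans hs
    have hB := stepB n xs hs
    simp only [List.foldl_cons, ne_eq, ite_not]
    simp only [ne_eq, ite_not] at ih
    by_cases hP : xs.takeWhile (fun x => decide (x ≤ n)) = []
    · rw [dif_pos hP] at hA hB
      rw [hA, hB]
      exact ih xs (ans ++ [-1]) hs
    · rw [dif_neg hP] at hA hB
      rw [hA, hB]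
      exact ih _ (ans ++ [(xs.takeWhile (fun x => decide (x ≤ n))).getLast hP]) (sorted_step n xs hs)

-- Python's sorted(xs, reverse=True) on ints is the reverse of sorted(xs)
lemma sorted_rev_eq (xs : List Int) :
    PySem.List.sorted xs (fun x => x) true = (PySem.List.sorted xs (fun x => x) false).reverse := by
  refine List.Perm.eq_of_pairwise (le := fun a b : Int => b ≤ a)
      (fun a b _ _ h1 h2 => le_antisymm h2 h1) ?_ ?_ ?_
  · exact PySem.List.sorted_pairwise_rev xs (fun x => x)
  · exact (List.pairwise_reverse).mpr (PySem.List.sorted_pairwise xs (fun x => x))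
  · exact ((PySem.List.sorted_perm xs (fun x => x) true).trans
      ((PySem.List.sorted_perm xs (fun x => x) false).symm)).trans (List.reverse_perm _).symm

-- ===== VERDICT (by name: the statement is the Claim_ definition above) =====
theorem solve_spec : Claim_equal_solve := by
  intro tickets nums _
  unfold Spec_solve solve solve_alt
  rw [sorted_rev_eq]
  exact fold_eq nums (PySem.List.sorted tickets (fun x => x) false) []
    (by simpa using PySem.List.sorted_pairwise tickets (fun x => x))
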